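-- pv_equiv track=rewrite | github.com/UT-NDML/nanoSint | tempGradientScripts/temperatureProfile.py | plotLaser
-- ===== SOURCE A (Python) =====
-- def plotLaser(boxSize,array,colors):
--
--     pos = [[],[],[],[]]
--
--     for iz in range(boxSize[2]):
--         for iy in range(boxSize[1]):
--             for ix in range(boxSize[0]):
--                 l = iz*boxSize[0]*boxSize[1] + iy*boxSize[0] + ix
--                 if array[l]:
--                     pos[0].append(ix)
--                     pos[1].append(iy)
--                     pos[2].append(iz)
--                     pos[3].append(colors[str(array[l])])
--     return pos
-- ===== SOURCE B (Python) =====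
-- def plotLaser(boxSize, array, colors):
--     nx, ny, nz = boxSize[0], boxSize[1], boxSize[2]
--     if nx <= 0 or ny <= 0 or nz <= 0:
--         return [[], [], [], []]
--     plane = nx * ny
--     xs, ys, zs, cs = [], [], [], []
--     for l in range(plane * nz):
--         v = array[l]
--         if v:
--             xs.append(l % nx)
--             ys.append((l // nx) % ny)
--             zs.append(l // plane)
--             cs.append(colors[str(v)])
--     return [xs, ys, zs, cs]
-- ===== Notes on version B (the rewrite author's own statement) =====
-- stated objective: simpler
-- what changed: Replaces the three nested coordinate loops (which recompose a flat index l from ix,iy,iz) by a single loop over the flat index l that recovers ix,iy,iz by div/mod, with an explicit early return for degenerate (non-positive) box dimensions.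
import Mathlib
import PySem

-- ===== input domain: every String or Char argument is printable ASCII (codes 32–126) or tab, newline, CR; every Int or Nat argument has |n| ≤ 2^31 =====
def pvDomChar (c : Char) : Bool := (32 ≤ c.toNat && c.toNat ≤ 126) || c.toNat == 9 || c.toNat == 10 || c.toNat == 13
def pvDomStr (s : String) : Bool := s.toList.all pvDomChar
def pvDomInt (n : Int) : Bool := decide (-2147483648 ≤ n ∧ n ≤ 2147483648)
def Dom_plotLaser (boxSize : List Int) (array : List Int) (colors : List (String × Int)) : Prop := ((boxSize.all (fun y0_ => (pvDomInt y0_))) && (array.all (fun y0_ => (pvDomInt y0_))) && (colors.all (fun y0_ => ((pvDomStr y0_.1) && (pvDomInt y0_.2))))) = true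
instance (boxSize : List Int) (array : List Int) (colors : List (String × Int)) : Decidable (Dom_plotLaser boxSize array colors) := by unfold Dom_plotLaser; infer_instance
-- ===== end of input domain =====

-- B replaces the three nested coordinate loops by one loop over the flat index,
-- recovering ix,iy,iz by div/mod (objective: simpler decomposition, same cost).

-- ===== PORT A =====
-- literal transliteration of A's triple nested loop; pos is the 4-tuple of lists.
def plotLaser (boxSize : List Int) (array : List Int) (colors : List (String × Int)) : List (List Int) :=
  let pos : List Int × List Int × List Int × List Int :=
    (PySem.List.pyRange 0 (PySem.List.pyGetD boxSize 2 0) 1).foldl (fun pos iz =>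
      (PySem.List.pyRange 0 (PySem.List.pyGetD boxSize 1 0) 1).foldl (fun pos iy =>
        (PySem.List.pyRange 0 (PySem.List.pyGetD boxSize 0 0) 1).foldl (fun pos ix =>
          let l := iz * PySem.List.pyGetD boxSize 0 0 * PySem.List.pyGetD boxSize 1 0
                     + iy * PySem.List.pyGetD boxSize 0 0 + ix
          if PySem.List.pyGetD array l 0 ≠ 0 then
            (pos.1 ++ [ix], pos.2.1 ++ [iy], pos.2.2.1 ++ [iz],
             pos.2.2.2 ++ [((colors.lookup (PySem.Int.toStr (PySem.List.pyGetD array l 0))).getD 0)])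
          else pos) pos) pos)
      (([] : List Int), ([] : List Int), ([] : List Int), ([] : List Int))
  [pos.1, pos.2.1, pos.2.2.1, pos.2.2.2]

-- ===== PORT B =====
-- literal transliteration of Source B: early return for degenerate boxes, single flat loop.
def plotLaser_alt (boxSize : List Int) (array : List Int) (colors : List (String × Int)) : List (List Int) :=
  let nx := PySem.List.pyGetD boxSize 0 0
  let ny := PySem.List.pyGetD boxSize 1 0
  let nz := PySem.List.pyGetD boxSize 2 0
  if nx ≤ 0 ∨ ny ≤ 0 ∨ nz ≤ 0 then [[], [], [], []]
  else
    let plane := nx * ny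
    let pos : List Int × List Int × List Int × List Int :=
      (PySem.List.pyRange 0 (plane * nz) 1).foldl (fun pos l =>
        let v := PySem.List.pyGetD array l 0
        if v ≠ 0 then
          (pos.1 ++ [PySem.Int.mod l nx],
           pos.2.1 ++ [PySem.Int.mod (PySem.Int.floordiv l nx) ny],
           pos.2.2.1 ++ [PySem.Int.floordiv l plane],
           pos.2.2.2 ++ [((colors.lookup (PySem.Int.toStr v)).getD 0)])
        else pos)
        (([] : List Int), ([] : List Int), ([] : List Int), ([] : List Int))
    [pos.1, pos.2.1, pos.2.2.1, pos.2.2.2]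

-- ===== PRECONDITION & SPEC =====
-- Pre_ excludes exactly where Python A raises: boxSize shorter than 3 (IndexError),
-- a flat index reaching past array (IndexError), or a nonzero cell whose str value
-- is missing from colors (KeyError).
def Pre_plotLaser (boxSize : List Int) (array : List Int) (colors : List (String × Int)) : Prop :=
  3 ≤ boxSize.length ∧
  ((0 < boxSize.getD 0 0 ∧ 0 < boxSize.getD 1 0 ∧ 0 < boxSize.getD 2 0) →
    ((boxSize.getD 0 0 * boxSize.getD 1 0 * boxSize.getD 2 0).toNat ≤ array.length ∧
     ∀ l ∈ List.range (boxSize.getD 0 0 * boxSize.getD 1 0 * boxSize.getD 2 0).toNat,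
       array.getD l 0 ≠ 0 → (colors.lookup (PySem.Int.toStr (array.getD l 0))).isSome))
instance (boxSize : List Int) (array : List Int) (colors : List (String × Int)) : Decidable (Pre_plotLaser boxSize array colors) := by unfold Pre_plotLaser; infer_instance

def pvWitness_plotLaser : List Int × List Int × (List (String × Int)) :=
  ([2, 2, 1], [0, 3, 0, 3], [("3", 7)])

def Spec_plotLaser (boxSize : List Int) (array : List Int) (colors : List (String × Int)) (out : List (List Int)) : Prop := out = plotLaser_alt boxSize array colors
instance (boxSize : List Int) (array : List Int) (colors : List (String × Int)) (out : List (List Int)) : Decidable (Spec_plotLaser boxSize array colors out) := by unfold Spec_plotLaser; infer_instance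

-- ===== CLAIM (what is proved, stated in full; the proofs are below) =====
def Claim_equal_plotLaser : Prop := ∀ (boxSize : List Int) (array : List Int) (colors : List (String × Int)), Dom_plotLaser boxSize array colors → Pre_plotLaser boxSize array colors → Spec_plotLaser boxSize array colors (plotLaser boxSize array colors)

-- ===== LEMMAS AND PROOFS =====

-- collapse two nested Nat-range folds into one over range (m*n)
theorem pvFoldFlatten {σ : Type} (g : σ → Nat → σ) (m n : Nat) (init : σ) :
    (List.range m).foldl (fun s j => (List.range n).foldl (fun s i => g s (j * n + i)) s) init
      = (List.range (m * n)).foldl g init := by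
  induction m generalizing init with
  | zero => simp
  | succ m ih =>
      rw [List.range_succ, List.foldl_append, ih, Nat.succ_mul, List.range_add,
          List.foldl_append, List.foldl_map]
      simp

-- a foldl whose body ignores the element is constant
theorem pvFoldConst {σ α : Type} (l : List α) (init : σ) :
    l.foldl (fun s _ => s) init = init := by
  induction l with
  | nil => rfl
  | cons a l ih => simp [List.foldl_cons, ih]

theorem pvFoldCongr {σ α : Type} (f g : σ → α → σ) (l : List α) (init : σ)
    (h : ∀ s, ∀ x ∈ l, f s x = g s x) :
    l.foldl f init = l.foldl g init := by
  induction l generalizing init with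
  | nil => rfl
  | cons a l ih =>
      simp only [List.foldl_cons]
      rw [h init a (List.mem_cons_self), ih]
      intro s x hx; exact h s x (List.mem_cons_of_mem _ hx)

theorem pvFlatten3 {σ : Type} (g : σ → Nat → σ) (a b c : Nat) (init : σ) :
    (List.range c).foldl (fun s iz => (List.range b).foldl (fun s iy =>
        (List.range a).foldl (fun s ix => g s (iz * (b * a) + (iy * a + ix))) s) s) init
      = (List.range (c * (b * a))).foldl g init := by
  calc (List.range c).foldl (fun s iz => (List.range b).foldl (fun s iy =>
          (List.range a).foldl (fun s ix => g s (iz * (b * a) + (iy * a + ix))) s) s) init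
      = (List.range c).foldl (fun s iz =>
          (List.range (b * a)).foldl (fun s k => g s (iz * (b * a) + k)) s) init :=
        pvFoldCongr _ _ _ init (fun s iz _ => pvFoldFlatten (fun s k => g s (iz * (b * a) + k)) b a s)
    _ = (List.range (c * (b * a))).foldl g init := pvFoldFlatten g c (b * a) init

-- coordinate recovery: for l = iz*a*b + iy*a + ix with ix < a, iy < b, Python's
-- l % a, (l // a) % b, l // (a*b) give back ix, iy, iz
theorem pvIdx (a b ix iy iz : Nat) (ha : 0 < a) (hb : 0 < b) (hix : ix < a) (hiy : iy < b) :
    PySem.Int.mod ((iz : Int) * a * b + (iy : Int) * a + ix) a = ix ∧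
    PySem.Int.mod (PySem.Int.floordiv ((iz : Int) * a * b + (iy : Int) * a + ix) a) b = iy ∧
    PySem.Int.floordiv ((iz : Int) * a * b + (iy : Int) * a + ix) ((a : Int) * b) = iz := by
  have haI : (0 : Int) < (a : Int) := by exact_mod_cast ha
  have hbI : (0 : Int) < (b : Int) := by exact_mod_cast hb
  have hixI : ((ix : Int)) < (a : Int) := by exact_mod_cast hix
  have hiyI : ((iy : Int)) < (b : Int) := by exact_mod_cast hiy
  have hl : ((iz : Int) * a * b + (iy : Int) * a + ix) = (ix : Int) + (a : Int) * ((iz : Int) * b + iy) := by ring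
  have hdiv : PySem.Int.floordiv ((iz : Int) * a * b + (iy : Int) * a + ix) a = (iz : Int) * b + iy := by
    rw [PySem.Int.floordiv_eq_ediv_of_pos haI, hl,
        show ((ix : Int) + (a : Int) * ((iz : Int) * b + iy)) = (ix : Int) + ((iz : Int) * b + iy) * a from by ring,
        Int.add_mul_ediv_right _ _ (ne_of_gt haI), Int.ediv_eq_zero_of_lt (by positivity) hixI, zero_add]
  refine ⟨?_, ?_, ?_⟩
  · rw [PySem.Int.mod_eq_emod_of_pos haI, hl, Int.add_mul_emod_self_left,
        Int.emod_eq_of_lt (by positivity) hixI]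
  · rw [hdiv, PySem.Int.mod_eq_emod_of_pos hbI,
        show ((iz : Int) * b + iy) = (iy : Int) + (b : Int) * iz from by ring,
        Int.add_mul_emod_self_left, Int.emod_eq_of_lt (by positivity) hiyI]
  · have hbound : (iy : Int) * a + ix < (a : Int) * b := by
      have hb1 : ((iy : Int)) + 1 ≤ (b : Int) := hiyI
      linarith [mul_le_mul_of_nonneg_right hb1 haI.le, hixI]
    rw [PySem.Int.floordiv_eq_ediv_of_pos (by positivity),
        show ((iz : Int) * a * b + (iy : Int) * a + ix) = ((iy : Int) * a + ix) + (iz : Int) * ((a : Int) * b) from by ring,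
        Int.add_mul_ediv_right _ _ (by positivity : (0:Int) < (a:Int)*b).ne',
        Int.ediv_eq_zero_of_lt (by positivity) hbound, zero_add]

-- the nested (iz,iy,ix) fold of any body F equals the flat fold of G over a*b*c
-- indices, provided F and G agree at l = iz*a*b + iy*a + ix
theorem pvNest {σ : Type} (F : σ → Nat → Nat → Nat → σ) (G : σ → Nat → σ) (a b c : Nat) (init : σ)
    (hFG : ∀ (s : σ) (iz iy ix : Nat), iz < c → iy < b → ix < a →
      F s iz iy ix = G s (iz * (b * a) + (iy * a + ix))) :
    (List.range c).foldl (fun s iz => (List.range b).foldl (fun s iy =>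
        (List.range a).foldl (fun s ix => F s iz iy ix) s) s) init
      = (List.range (a * b * c)).foldl G init := by
  rw [show a * b * c = c * (b * a) from by ring, ← pvFlatten3 G a b c init]
  refine pvFoldCongr _ _ _ init (fun s iz hiz => ?_)
  refine pvFoldCongr _ _ _ s (fun s' iy hiy => ?_)
  refine pvFoldCongr _ _ _ s' (fun s'' ix hix => ?_)
  exact hFG s'' iz iy ix (List.mem_range.mp hiz) (List.mem_range.mp hiy) (List.mem_range.mp hix)

-- ===== VERDICT (by name: the statement is the Claim_ definition above) =====
theorem plotLaser_spec : Claim_equal_plotLaser := by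
  intro boxSize array colors _ _
  unfold Spec_plotLaser plotLaser plotLaser_alt
  dsimp only
  generalize PySem.List.pyGetD boxSize 0 0 = nx
  generalize PySem.List.pyGetD boxSize 1 0 = ny
  generalize PySem.List.pyGetD boxSize 2 0 = nz
  by_cases h : nx ≤ 0 ∨ ny ≤ 0 ∨ nz ≤ 0
  · rw [if_pos h]
    rcases h with h | h | h
    · simp only [show PySem.List.pyRange 0 nx 1 = [] from PySem.List.pyRange_one_eq_nil h,
        List.foldl_nil, pvFoldConst]
    · simp only [show PySem.List.pyRange 0 ny 1 = [] from PySem.List.pyRange_one_eq_nil h,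
        List.foldl_nil, pvFoldConst]
    · rw [show PySem.List.pyRange 0 nz 1 = [] from PySem.List.pyRange_one_eq_nil h, List.foldl_nil]
  · rw [if_neg h]
    push Not at h
    obtain ⟨h1, h2, h3⟩ := h
    obtain ⟨a, rfl⟩ : ∃ m : Nat, nx = (m : Int) := ⟨nx.toNat, by omega⟩
    obtain ⟨b, rfl⟩ : ∃ m : Nat, ny = (m : Int) := ⟨ny.toNat, by omega⟩
    obtain ⟨c, rfl⟩ : ∃ m : Nat, nz = (m : Int) := ⟨nz.toNat, by omega⟩
    have ha : 0 < a := by exact_mod_cast h1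
    have hb : 0 < b := by exact_mod_cast h2
    rw [show ((a : Int) * b * c) = ((a * b * c : Nat) : Int) from by push_cast; ring]
    simp only [PySem.List.pyRange_zero_nat, List.foldl_map]
    refine congrArg (fun p : List Int × List Int × List Int × List Int =>
      [p.1, p.2.1, p.2.2.1, p.2.2.2]) ?_
    refine pvNest _ _ a b c _ (fun s iz iy ix hiz hiy hix => ?_)
    have hl : ((iz * (b * a) + (iy * a + ix) : Nat) : Int)
        = (iz : Int) * a * b + (iy : Int) * a + ix := by push_cast; ring

    rw [hl]
    obtain ⟨e1, e2, e3⟩ := pvIdx a b ix iy iz ha hb hix hiy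
    by_cases hv : PySem.List.pyGetD array ((iz : Int) * a * b + (iy : Int) * a + ix) 0 ≠ 0
    · simp only [if_pos hv, e1, e2, e3]
    · simp only [if_neg hv]
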